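-- pv_equiv track=rewrite | github.com/brunizzl/Informatik-Bundeswehr | 2024-Tag-6/demo.py | plus_1
-- ===== SOURCE A (Python) =====
-- def plus_1(zahl: list[int]) -> list[int]:
--     erg = zahl.copy()
--     i = 0
--     while i < len(zahl):
--         if erg[i] == 0:
--             erg[i] = 1
--             return erg
--         else:
--             erg[i] = 0
--         i += 1
--     return erg + [1]
-- ===== SOURCE B (Python) =====
-- def plus_1(zahl: list[int]) -> list[int]:
--     try:
--         i = zahl.index(0)
--     except ValueError:
--         return [0] * len(zahl) + [1]
--     return [0] * i + [1] + zahl[i + 1:]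
-- ===== Notes on version B (the rewrite author's own statement) =====
-- stated objective: simpler
-- what changed: Replaces the mutate-and-early-return index loop by locating the first zero with list.index and constructing the result directly from replicate/slice pieces.
import Mathlib
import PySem

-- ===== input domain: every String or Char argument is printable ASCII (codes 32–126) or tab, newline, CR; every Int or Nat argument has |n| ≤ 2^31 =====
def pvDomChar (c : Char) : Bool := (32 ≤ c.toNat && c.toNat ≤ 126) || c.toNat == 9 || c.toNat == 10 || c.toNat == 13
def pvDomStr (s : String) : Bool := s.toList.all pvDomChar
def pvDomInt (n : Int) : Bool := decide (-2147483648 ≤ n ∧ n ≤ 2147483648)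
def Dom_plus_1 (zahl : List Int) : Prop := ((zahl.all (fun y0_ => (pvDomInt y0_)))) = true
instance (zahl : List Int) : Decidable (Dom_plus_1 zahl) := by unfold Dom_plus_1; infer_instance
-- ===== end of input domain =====

-- B replaces the mutate-and-early-return scan by list.index(0) plus direct construction from replicate/slice pieces (objective: simpler).


-- ===== PORT A =====
-- the while loop over erg with early return, as structural recursion over the remaining list
def plus1Loop : List Int → List Int
  | [] => [1]
  | x :: xs => if x == 0 then 1 :: xs else 0 :: plus1Loop xs

def plus_1 (zahl : List Int) : List Int := plus1Loop zahl

-- ===== PORT B =====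
def plus_1_alt (zahl : List Int) : List Int :=
  match PySem.List.index? zahl 0 with
  | some i => List.replicate i 0 ++ [1] ++ zahl.drop (i + 1)
  | none => List.replicate zahl.length 0 ++ [1]

-- ===== PRECONDITION & SPEC =====
def Spec_plus_1 (zahl : List Int) (out : List Int) : Prop := out = plus_1_alt zahl
instance (zahl : List Int) (out : List Int) : Decidable (Spec_plus_1 zahl out) := by unfold Spec_plus_1; infer_instance

-- ===== CLAIM (what is proved, stated in full; the proofs are below) =====
def Claim_equal_plus_1 : Prop := ∀ (zahl : List Int), Dom_plus_1 zahl → Spec_plus_1 zahl (plus_1 zahl)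

-- ===== LEMMAS AND PROOFS =====
theorem plus1_eq_alt (zahl : List Int) : plus_1 zahl = plus_1_alt zahl := by
  induction zahl with
  | nil => rfl
  | cons x xs ih =>
    by_cases hx : x = 0
    · subst hx
      have hA : plus_1 (0 :: xs) = 1 :: xs := by simp [plus_1, plus1Loop]
      rw [hA]
      unfold plus_1_alt
      rw [PySem.List.index?_cons_self]
      simp
    · have hA : plus_1 (x :: xs) = 0 :: plus_1 xs := by simp [plus_1, plus1Loop, hx]
      rw [hA, ih]
      unfold plus_1_alt
      rw [PySem.List.index?_cons_of_ne xs hx]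
      cases h : PySem.List.index? xs 0 with
      | none => simp [List.replicate_succ]
      | some i => simp [List.replicate_succ]

-- ===== VERDICT (by name: the statement is the Claim_ definition above) =====
theorem plus_1_spec : Claim_equal_plus_1 := by
  intro zahl _
  exact plus1_eq_alt zahl
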